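-- pv_equiv track=rewrite | github.com/GenryEden/kpolyakovName | 413.py | f
-- ===== SOURCE A (Python) =====
-- def f(x):
-- 	a = 0
-- 	b = 0
-- 	while x > 0:
-- 		a += 1
-- 		if x % 2 == 0:
-- 			b += x % 10
-- 		x //= 10
-- 	return a, b
-- ===== SOURCE B (Python) =====
-- def f(x):
--     if x <= 0:
--         return (0, 0)
--     s = str(x)
--     a = len(s)
--     b = sum(int(d) for d in s if int(d) % 2 == 0)
--     return a, b
-- ===== Notes on version B (the rewrite author's own statement) =====
-- stated objective: idiomatic
-- what changed: B converts x to its decimal string once and takes the string length for the count and a filtered generator sum over the digit characters (most-significant-first) for the even-digit sum, instead of A's arithmetic loop peeling digits least-significant-first with repeated floor division; it works because a positive number is even exactly when its last decimal digit is even.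
import Mathlib
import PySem

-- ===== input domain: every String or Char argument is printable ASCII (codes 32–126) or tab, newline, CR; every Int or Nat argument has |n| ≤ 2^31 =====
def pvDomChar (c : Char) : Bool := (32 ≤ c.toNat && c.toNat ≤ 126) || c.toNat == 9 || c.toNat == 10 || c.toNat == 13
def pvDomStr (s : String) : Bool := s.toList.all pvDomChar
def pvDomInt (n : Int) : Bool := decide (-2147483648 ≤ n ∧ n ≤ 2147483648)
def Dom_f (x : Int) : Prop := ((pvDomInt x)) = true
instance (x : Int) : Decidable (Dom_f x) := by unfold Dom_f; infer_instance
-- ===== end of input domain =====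

-- B replaces A's least-significant-first arithmetic digit-peeling loop by the decimal
-- string of x: length for the count, filtered sum over digit characters for the even-digit sum
-- (idiomatic; same cost).


-- ===== PORT A =====
-- the while loop: state (x, a, b), x //= 10 each round
def fLoop (x a b : Int) : Int × Int :=
  if h : 0 < x then
    fLoop (PySem.Int.floordiv x 10)
      (a + 1)
      (if PySem.Int.mod x 2 = 0 then b + PySem.Int.mod x 10 else b)
  else (a, b)
termination_by x.toNat
decreasing_by
  have h10 : PySem.Int.floordiv x 10 = x / 10 :=
    PySem.Int.floordiv_eq_ediv_of_pos (by omega)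
  rw [h10]; omega

def f (x : Int) : Int × Int := fLoop x 0 0

-- ===== PORT B =====
-- int(d) on a single decimal digit character is exactly (d.toNat - 48); exact on the digit
-- chars produced by str(x) for x > 0
def digitVal (c : Char) : Int := (c.toNat : Int) - 48

def f_alt (x : Int) : Int × Int :=
  if x ≤ 0 then (0, 0)
  else
    let s := PySem.Int.toChars x
    ((s.length : Int),
     (((s.filter (fun d => PySem.Int.mod (digitVal d) 2 = 0)).map digitVal).sum))

-- ===== PRECONDITION & SPEC =====
def Spec_f (x : Int) (out : Int × Int) : Prop := out = f_alt x
instance (x : Int) (out : Int × Int) : Decidable (Spec_f x out) := by unfold Spec_f; infer_instance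

-- ===== CLAIM (what is proved, stated in full; the proofs are below) =====
def Claim_equal_f : Prop := ∀ (x : Int), Dom_f x → Spec_f x (f x)

-- ===== LEMMAS AND PROOFS =====

-- big-endian decimal digit characters of a positive Nat
def D (m : Nat) : List Char :=
  if m < 10 then [Nat.digitChar m] else D (m / 10) ++ [Nat.digitChar (m % 10)]
termination_by m
decreasing_by exact Nat.div_lt_self (by omega) (by omega)

lemma D_lt (m : Nat) (h : m < 10) : D m = [Nat.digitChar m] := by
  conv_lhs => rw [D]
  rw [if_pos h]

lemma D_ge (m : Nat) (h : ¬ m < 10) : D m = D (m / 10) ++ [Nat.digitChar (m % 10)] := by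
  conv_lhs => rw [D]
  rw [if_neg h]

lemma toDigitsCore_eq_D (f m : Nat) (acc : List Char) (hm : 0 < m) (hf : m < f) :
    Nat.toDigitsCore 10 f m acc = D m ++ acc := by
  induction f generalizing m acc with
  | zero => omega
  | succ f ih =>
    rw [Nat.toDigitsCore]
    by_cases h : m / 10 = 0
    · have hlt : m < 10 := by omega
      simp [h, D, hlt, Nat.mod_eq_of_lt hlt]
    · have h10 : ¬ m < 10 := by omega
      rw [if_neg h, ih (m / 10) _ (by omega) (by omega), D_ge m h10]
      simp

lemma toDigits_eq_D (m : Nat) (hm : 0 < m) : Nat.toDigits 10 m = D m := by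
  rw [Nat.toDigits, toDigitsCore_eq_D (m + 1) m [] hm (by omega), List.append_nil]

lemma digitVal_digitChar (d : Nat) (hd : d < 10) :
    digitVal (Nat.digitChar d) = (d : Int) := by
  interval_cases d <;> decide

-- the even-digit sum of a char list, as B computes it
def eSum (cs : List Char) : Int :=
  ((cs.filter (fun d => PySem.Int.mod (digitVal d) 2 = 0)).map digitVal).sum

lemma eSum_singleton (c : Char) :
    eSum [c] = if PySem.Int.mod (digitVal c) 2 = 0 then digitVal c else 0 := by
  simp only [eSum, List.filter_singleton]
  split_ifs <;> simp_all

lemma eSum_append (xs ys : List Char) : eSum (xs ++ ys) = eSum xs + eSum ys := by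
  simp [eSum, List.filter_append]

lemma fLoop_eq_D (m : Nat) (hm : 0 < m) (a b : Int) :
    fLoop (m : Int) a b = (a + ((D m).length : Int), b + eSum (D m)) := by
  induction m using Nat.strong_induction_on generalizing a b with
  | _ m ih =>
    rw [fLoop]
    have hpos : (0 : Int) < (m : Int) := by exact_mod_cast hm
    rw [dif_pos hpos]
    have hdiv : PySem.Int.floordiv (m : Int) 10 = ((m / 10 : Nat) : Int) :=
      PySem.Int.floordiv_natCast m 10
    have hmod10 : PySem.Int.mod (m : Int) 10 = ((m % 10 : Nat) : Int) :=
      PySem.Int.mod_natCast m 10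
    have hmod2 : PySem.Int.mod (m : Int) 2 = ((m % 2 : Nat) : Int) :=
      PySem.Int.mod_natCast m 2
    have hdv : digitVal (Nat.digitChar (m % 10)) = ((m % 10 : Nat) : Int) :=
      digitVal_digitChar (m % 10) (Nat.mod_lt m (by omega))
    have hstep : (if PySem.Int.mod (m : Int) 2 = 0
        then b + PySem.Int.mod (m : Int) 10 else b)
        = b + eSum [Nat.digitChar (m % 10)] := by
      have he := eSum_singleton (Nat.digitChar (m % 10))
      have h2 : PySem.Int.mod ((m % 10 : Nat) : Int) 2 = ((m % 10 % 2 : Nat) : Int) :=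
        PySem.Int.mod_natCast (m % 10) 2
      rw [he, hdv, hmod10, hmod2, h2]
      split_ifs <;> omega
    by_cases hsmall : m < 10
    · have hd0 : m / 10 = 0 := by omega
      rw [hdiv, hd0]
      rw [hstep]
      rw [fLoop]
      rw [dif_neg (by norm_num)]
      rw [D_lt m hsmall]
      have : m % 10 = m := Nat.mod_eq_of_lt hsmall
      simp [this]
    · have hd0 : 0 < m / 10 := Nat.div_pos (by omega) (by omega)
      rw [hdiv, hstep, ih (m / 10) (Nat.div_lt_self hm (by omega)) hd0]
      rw [D_ge m hsmall, eSum_append, List.length_append]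
      rw [Prod.mk.injEq]
      simp only [List.length_singleton]
      push_cast
      constructor <;> ring

lemma toChars_pos (x : Int) (hx : 0 < x) :
    PySem.Int.toChars x = D x.toNat := by
  rw [PySem.Int.toChars, if_neg (by omega), toDigits_eq_D x.toNat (by omega)]

-- ===== VERDICT (by name: the statement is the Claim_ definition above) =====
theorem f_spec : Claim_equal_f := by
  intro x _
  unfold Spec_f f f_alt
  by_cases hx : x ≤ 0
  · rw [fLoop, dif_neg (by omega), if_pos hx]
  · have hx' : 0 < x := by omega
    rw [if_neg hx]
    have hc := toChars_pos x hx'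
    have hm : 0 < x.toNat := by omega
    have hxc : ((x.toNat : Nat) : Int) = x := by omega
    have := fLoop_eq_D x.toNat hm 0 0
    rw [hxc] at this
    rw [this, hc]
    simp [eSum]
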